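-- pv_equiv track=rewrite | github.com/evanstanderwick/OSU-Ling3802-PhishingEmailFeatures | dataParser.py | findSymbolsBody
-- ===== SOURCE A (Python) =====
-- BODYSYMBOLSCUTOFF = 5
--
-- def findSymbolsBody(body):
--   #Here we're checking for common closings
--    #Here we're checking for common closings
--     symbolKeys = ['@', '!', '$', '#']
--     stringWords = body.split()
--     cutoff = BODYSYMBOLSCUTOFF
--
--     #loop through list and count number of spamWords
--     count = 0
--     for x in stringWords:
--       for y in symbolKeys:
--         if (x == y):
--           count += 1
--
--     #Compare with cutoff
--     if count >= cutoff:
--       symbolFeature = "body_symbols:high"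
--     else:
--       symbolFeature = "body_symbols:low"
--
--     #return
--     return symbolFeature
-- ===== SOURCE B (Python) =====
-- BODYSYMBOLSCUTOFF = 5
--
-- def findSymbolsBody(body):
--     # Character-level state machine over the raw string: no word list is built.
--     # state: None = between words; True = current word so far is a lone symbol
--     # character; False = current word cannot be a lone symbol.
--     count = 0
--     state = None
--     for ch in body:
--         if ch.isspace():
--             if state is True:
--                 count += 1
--             state = None
--         elif state is None:
--             state = ch in '@!$#'
--         else:
--             state = False
--     if state is True:
--         count += 1
--     return "body_symbols:high" if count >= BODYSYMBOLSCUTOFF else "body_symbols:low"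
-- ===== Notes on version B (the rewrite author's own statement) =====
-- stated objective: alternative
-- what changed: Replaces A's split-into-words plus nested word-by-symbol comparison loop with a single character-level state machine over the raw string that counts whitespace-delimited lone-symbol words without ever building a word list.
import Mathlib
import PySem

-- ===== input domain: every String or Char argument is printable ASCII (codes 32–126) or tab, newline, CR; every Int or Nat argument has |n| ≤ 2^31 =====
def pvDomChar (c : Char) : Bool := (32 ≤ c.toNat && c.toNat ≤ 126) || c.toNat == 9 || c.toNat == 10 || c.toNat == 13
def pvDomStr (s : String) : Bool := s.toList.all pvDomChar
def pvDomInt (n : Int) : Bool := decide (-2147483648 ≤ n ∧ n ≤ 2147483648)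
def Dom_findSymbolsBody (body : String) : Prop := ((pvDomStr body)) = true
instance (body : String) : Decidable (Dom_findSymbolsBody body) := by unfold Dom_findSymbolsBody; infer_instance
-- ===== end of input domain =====

-- B replaces A's split-then-nested-comparison counting with a single character-level
-- state machine over the raw string that never builds the word list (alternative).

-- ===== PORT A =====
def findSymbolsBody (body : String) : String :=
  let symbolKeys : List String := ["@", "!", "$", "#"]
  let stringWords := PySem.Str.split₀ body
  let cutoff : Int := 5
  let count : Int :=
    stringWords.foldl (fun c x => symbolKeys.foldl (fun c y => if x == y then c + 1 else c) c) 0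
  if count ≥ cutoff then "body_symbols:high" else "body_symbols:low"

-- ===== PORT B =====
-- 'ch in "@!$#"' of Source B, checked character by character
def symChar (c : Char) : Bool := c == '@' || c == '!' || c == '$' || c == '#'

-- the body of Source B's for-loop: state none = between words, some true = current
-- word so far is a lone symbol char, some false = current word cannot be one
def bStep (st : Int × Option Bool) (c : Char) : Int × Option Bool :=
  if PySem.Chars.isspace c then
    ((if st.2 == some true then st.1 + 1 else st.1), none)
  else
    match st.2 with
    | none => (st.1, some (symChar c))
    | some _ => (st.1, some false)

def findSymbolsBody_alt (body : String) : String :=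
  let st := body.toList.foldl bStep (0, none)
  let count : Int := if st.2 == some true then st.1 + 1 else st.1
  if count ≥ 5 then "body_symbols:high" else "body_symbols:low"

-- ===== PRECONDITION & SPEC =====
def Spec_findSymbolsBody (body : String) (out : String) : Prop := out = findSymbolsBody_alt body
instance (body : String) (out : String) : Decidable (Spec_findSymbolsBody body out) := by unfold Spec_findSymbolsBody; infer_instance

-- ===== CLAIM (what is proved, stated in full; the proofs are below) =====
def Claim_equal_findSymbolsBody : Prop := ∀ (body : String), Dom_findSymbolsBody body → Spec_findSymbolsBody body (findSymbolsBody body)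

-- ===== LEMMAS AND PROOFS =====

-- a word (as List Char) is one of the four symbol words
def isSymWord (w : List Char) : Bool := w == ['@'] || w == ['!'] || w == ['$'] || w == ['#']

-- the B state corresponding to a reversed current word `cur`
def stateOf : List Char → Option Bool
  | [] => none
  | [c] => some (symChar c)
  | _ => some false

-- A's nested loop counts words equal to one of the four (distinct) keys
theorem countA_eq (ws : List String) (c : Int) :
    ws.foldl (fun c x => (["@", "!", "$", "#"] : List String).foldl
        (fun c y => if x == y then c + 1 else c) c) c
    = c + (ws.countP (fun x => x == "@" || x == "!" || x == "$" || x == "#") : Int) := by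
  induction ws generalizing c with
  | nil => simp
  | cons w ws ih =>
    simp only [List.foldl_cons, List.countP_cons, ih]
    by_cases h1 : w = "@" <;> by_cases h2 : w = "!" <;> by_cases h3 : w = "$" <;>
      by_cases h4 : w = "#" <;> simp_all <;> push_cast <;> ring

-- unfolding equations for split₀.go
theorem split₀go_nil (cur : List Char) (acc : List (List Char)) :
    PySem.Chars.split₀.go [] cur acc
    = if cur.isEmpty then acc.reverse else (cur.reverse :: acc).reverse := by
  rw [PySem.Chars.split₀.go]

theorem split₀go_cons (c : Char) (rest cur : List Char) (acc : List (List Char)) :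
    PySem.Chars.split₀.go (c :: rest) cur acc
    = if PySem.Chars.isspace c then
        (if cur.isEmpty then PySem.Chars.split₀.go rest [] acc
         else PySem.Chars.split₀.go rest [] (cur.reverse :: acc))
      else PySem.Chars.split₀.go rest (c :: cur) acc := by
  rw [PySem.Chars.split₀.go]

-- split₀.go's accumulator is a prefix of its result
theorem split₀go_acc (s cur : List Char) (acc : List (List Char)) :
    PySem.Chars.split₀.go s cur acc = acc.reverse ++ PySem.Chars.split₀.go s cur [] := by
  induction s generalizing cur acc with
  | nil =>
    by_cases h : cur.isEmpty <;> simp [split₀go_nil, h]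
  | cons c rest ih =>
    by_cases hs : PySem.Chars.isspace c
    · by_cases h : cur.isEmpty
      · simp only [split₀go_cons, hs, h, if_true]
        exact ih [] acc
      · simp only [split₀go_cons, hs, h, if_true, Bool.false_eq_true, if_false]
        rw [ih, ih [] [cur.reverse]]
        simp
    · simp only [split₀go_cons, hs, Bool.false_eq_true, if_false]
      exact ih (c :: cur) acc

-- the helper finalize used only in proofs
theorem stateOf_cons (c : Char) (cur : List Char) :
    stateOf (c :: cur) = (match stateOf cur with
      | none => some (symChar c)
      | some _ => some false) := by
  cases cur with
  | nil => rfl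
  | cons a t => cases t <;> rfl

theorem stateOf_sym (cur : List Char) :
    (stateOf cur == some true) = isSymWord cur.reverse := by
  match cur with
  | [] => simp [stateOf, isSymWord]
  | [c] =>
    simp only [stateOf, List.reverse_singleton, isSymWord, symChar]
    by_cases h1 : c = '@' <;> by_cases h2 : c = '!' <;> by_cases h3 : c = '$' <;>
      by_cases h4 : c = '#' <;> simp_all
  | c1 :: c2 :: t =>
    have : (c1 :: c2 :: t).reverse = t.reverse ++ [c2, c1] := by simp
    rw [this]
    rcases t.reverse with _ | ⟨x, xs⟩ <;> simp [stateOf, isSymWord]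

-- main invariant: B's machine from state (count, stateOf cur) computes count plus the
-- number of symbol words among the words split₀.go will produce from (s, cur)
theorem machine_eq (s : List Char) (cur : List Char) (count : Int) :
    (let st := s.foldl bStep (count, stateOf cur)
     if st.2 == some true then st.1 + 1 else st.1)
    = count + ((PySem.Chars.split₀.go s cur []).countP isSymWord : Int) := by
  induction s generalizing cur count with
  | nil =>
    by_cases h : cur.isEmpty
    · have : cur = [] := by simpa [List.isEmpty_iff] using h
      subst this
      simp [PySem.Chars.split₀.go, stateOf]
    · simp only [split₀go_nil, h, Bool.false_eq_true, if_false]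
      simp only [List.foldl_nil, stateOf_sym]
      by_cases hw : isSymWord cur.reverse <;>
        simp [List.countP_cons, List.countP_nil, isSymWord] <;> simp_all [isSymWord]
  | cons c rest ih =>
    by_cases hs : PySem.Chars.isspace c
    · simp only [split₀go_cons, hs, if_true]
      have hstep : bStep (count, stateOf cur) c
          = ((if stateOf cur == some true then count + 1 else count), stateOf []) := by
        simp [bStep, hs, stateOf]
      by_cases h : cur.isEmpty
      · have hc : cur = [] := by simpa [List.isEmpty_iff] using h
        subst hc
        have hstep0 : bStep (count, none) c = (count, none) := by simp [bStep, hs]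
        have hih := ih [] count
        simp only [stateOf] at hih
        simp only [List.foldl_cons, stateOf, hstep0]
        exact hih
      · simp only [List.foldl_cons, hstep, h, Bool.false_eq_true, if_neg, if_false]
        rw [split₀go_acc]
        simp only [List.reverse_singleton, List.singleton_append, List.countP_cons]
        rw [stateOf_sym]
        by_cases hw : isSymWord cur.reverse
        · simp only [hw, if_true]
          rw [ih [] (count + 1)]
          simp [stateOf]
          ring
        · simp only [hw, Bool.false_eq_true, if_neg, if_false]
          rw [ih [] count]
          simp [stateOf]
    · simp only [split₀go_cons, hs, Bool.false_eq_true, if_false]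
      have hstep : bStep (count, stateOf cur) c = (count, stateOf (c :: cur)) := by
        rw [stateOf_cons]
        cases hst : stateOf cur <;> simp [bStep, hs]
      simp only [List.foldl_cons, hstep]
      exact ih (c :: cur) count

-- words as strings match the four keys iff their char lists do
theorem countP_words (cs : List Char) :
    ((PySem.Chars.split₀ cs).map String.ofList).countP
        (fun x => x == "@" || x == "!" || x == "$" || x == "#")
    = (PySem.Chars.split₀ cs).countP isSymWord := by
  rw [List.countP_map]
  apply List.countP_congr
  intro w _
  have h : ∀ (a : Char), (String.ofList w == String.ofList [a]) = (w == [a]) := by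
    intro a
    by_cases hw : w = [a]
    · simp [hw]
    · have : String.ofList w ≠ String.ofList [a] := by
        intro hcontra
        exact hw (by simpa using congrArg String.toList hcontra)
      simp [hw, this]
  simp only [Function.comp_apply]
  have e1 : ("@" : String) = String.ofList ['@'] := rfl
  have e2 : ("!" : String) = String.ofList ['!'] := rfl
  have e3 : ("$" : String) = String.ofList ['$'] := rfl
  have e4 : ("#" : String) = String.ofList ['#'] := rfl
  rw [e1, e2, e3, e4, h, h, h, h]
  simp [isSymWord]

-- ===== VERDICT (by name: the statement is the Claim_ definition above) =====
theorem findSymbolsBody_spec : Claim_equal_findSymbolsBody := by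
  intro body _
  unfold Spec_findSymbolsBody findSymbolsBody findSymbolsBody_alt
  simp only [countA_eq, PySem.Str.split₀, countP_words]
  have := machine_eq body.toList [] 0
  simp only [stateOf] at this
  rw [PySem.Chars.split₀] at *
  simp only [this]
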